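-- pv_equiv track=rewrite | github.com/tcpiplab/AblitaFuzzer | analysis_engine/remediation_advisor.py | calculate_parallel_timeline
-- ===== SOURCE A (Python) =====
-- from typing import Dict, List, Optional, Tuple
--
-- def calculate_parallel_timeline(timeline_estimates: List[Dict]) -> int:
--     """Calculate timeline considering parallel implementation possibilities."""
--     if not timeline_estimates:
--         return 0
--
--     # Group by parallelization possibility
--     parallel_tasks = [est for est in timeline_estimates if est['can_parallelize']]
--     sequential_tasks = [est for est in timeline_estimates if not est['can_parallelize']]
--
--     # Calculate parallel execution time (longest parallel task)
--     parallel_time = max([task['estimated_days'] for task in parallel_tasks]) if parallel_tasks else 0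
--
--     # Add sequential task time
--     sequential_time = sum(task['estimated_days'] for task in sequential_tasks)
--
--     return parallel_time + sequential_time
-- ===== SOURCE B (Python) =====
-- def calculate_parallel_timeline(timeline_estimates):
--     """Calculate timeline considering parallel implementation possibilities."""
--     if not timeline_estimates:
--         return 0
--     # Sort so that sequential tasks come first and parallelizable tasks form a
--     # suffix ordered by estimated_days: the answer is then read off the order
--     # directly (sum the sequential prefix, add the last element's days, which
--     # is the longest parallelizable task).
--     order = sorted(timeline_estimates,
--                    key=lambda e: (1 if e['can_parallelize'] else 0, e['estimated_days']))
--     total = 0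
--     i = 0
--     while i < len(order) and not order[i]['can_parallelize']:
--         total += order[i]['estimated_days']
--         i += 1
--     if i < len(order):
--         total += order[-1]['estimated_days']
--     return total
-- ===== Notes on version B (the rewrite author's own statement) =====
-- stated objective: alternative
-- what changed: Replaced A's filter/max/sum passes by a sort-then-scan: sort tasks by the tuple key (is_parallelizable, estimated_days) so sequential tasks form a prefix and the longest parallel task is the last element, then sum the prefix and add the last element's days if any parallel task exists.
import Mathlib
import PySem

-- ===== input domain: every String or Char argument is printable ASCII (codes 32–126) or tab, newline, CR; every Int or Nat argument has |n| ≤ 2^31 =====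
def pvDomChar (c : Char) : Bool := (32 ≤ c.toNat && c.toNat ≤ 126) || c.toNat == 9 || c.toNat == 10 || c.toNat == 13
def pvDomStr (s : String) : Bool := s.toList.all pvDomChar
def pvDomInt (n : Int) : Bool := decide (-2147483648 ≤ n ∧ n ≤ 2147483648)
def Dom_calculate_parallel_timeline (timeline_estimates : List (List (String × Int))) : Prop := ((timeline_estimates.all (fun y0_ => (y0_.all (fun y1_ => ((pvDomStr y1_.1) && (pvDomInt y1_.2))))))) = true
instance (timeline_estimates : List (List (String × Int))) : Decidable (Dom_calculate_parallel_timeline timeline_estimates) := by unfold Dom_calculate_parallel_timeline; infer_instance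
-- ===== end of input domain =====

-- B replaces A's filter/max/sum passes by a sort: order the tasks by (is_parallel, days),
-- sum the sequential prefix and add the last element's days when a parallel task exists
-- (alternative algorithm: sort-then-scan, O(n log n) vs A's O(n) passes).
-- Dict access est['k'] is ported as assoc-list first-match lookup; Pre_ excludes missing keys (KeyError in Python).

-- ===== PORT A =====
-- truthiness of est['can_parallelize'] (an int here): nonzero
def cptIsPar (est : List (String × Int)) : Bool := ((est.lookup "can_parallelize").getD 0) != 0
def cptDays (est : List (String × Int)) : Int := (est.lookup "estimated_days").getD 0

def calculate_parallel_timeline (timeline_estimates : List (List (String × Int))) : Int :=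
  if timeline_estimates = [] then 0
  else
    let parallel_tasks := timeline_estimates.filter (fun est => cptIsPar est)
    let sequential_tasks := timeline_estimates.filter (fun est => !cptIsPar est)
    let parallel_time : Int :=
      if parallel_tasks ≠ [] then
        (PySem.List.max? (parallel_tasks.map (fun t => cptDays t)) (fun x => x)).getD 0
      else 0
    let sequential_time := (sequential_tasks.map (fun t => cptDays t)).sum
    parallel_time + sequential_time

-- ===== PORT B =====
-- key component '1 if e['can_parallelize'] else 0'
def cptKey1 (est : List (String × Int)) : Int := if cptIsPar est then 1 else 0

-- the while loop: sum days while the current task is not parallelizable;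
-- the Bool records whether the loop stopped before the end (i < len(order))
def cptWalk (total : Int) : List (List (String × Int)) → Int × Bool
  | [] => (total, false)
  | e :: t => if !cptIsPar e then cptWalk (total + cptDays e) t else (total, true)

def calculate_parallel_timeline_alt (timeline_estimates : List (List (String × Int))) : Int :=
  if timeline_estimates = [] then 0
  else
    let order := PySem.List.sorted2 timeline_estimates cptKey1 cptDays
    match cptWalk 0 order with
    | (total, true) => total + ((order.getLast?.map cptDays).getD 0)   -- order[-1]['estimated_days']
    | (total, false) => total

-- ===== PRECONDITION & SPEC =====
-- Pre_ excludes estimates missing the 'can_parallelize' or 'estimated_days' key, on which Python A raises KeyError.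
def Pre_calculate_parallel_timeline (timeline_estimates : List (List (String × Int))) : Prop :=
  ∀ est ∈ timeline_estimates,
    (est.lookup "can_parallelize").isSome = true ∧ (est.lookup "estimated_days").isSome = true
instance (timeline_estimates : List (List (String × Int))) : Decidable (Pre_calculate_parallel_timeline timeline_estimates) := by unfold Pre_calculate_parallel_timeline; infer_instance

def pvWitness_calculate_parallel_timeline : (List (List (String × Int))) :=
  [[("can_parallelize", 1), ("estimated_days", 3)], [("can_parallelize", 0), ("estimated_days", 2)]]

def Spec_calculate_parallel_timeline (timeline_estimates : List (List (String × Int))) (out : Int) : Prop := out = calculate_parallel_timeline_alt timeline_estimates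
instance (timeline_estimates : List (List (String × Int))) (out : Int) : Decidable (Spec_calculate_parallel_timeline timeline_estimates out) := by unfold Spec_calculate_parallel_timeline; infer_instance

-- ===== CLAIM (what is proved, stated in full; the proofs are below) =====
def Claim_equal_calculate_parallel_timeline : Prop := ∀ (timeline_estimates : List (List (String × Int))), Dom_calculate_parallel_timeline timeline_estimates → Pre_calculate_parallel_timeline timeline_estimates → Spec_calculate_parallel_timeline timeline_estimates (calculate_parallel_timeline timeline_estimates)

-- ===== LEMMAS AND PROOFS =====
-- the lexicographic key B sorts by
def cptKey (est : List (String × Int)) : Int ×ₗ Int := toLex (cptKey1 est, cptDays est)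

-- sorted2 with key components (cptKey1, cptDays) is sorted with the lexicographic key
lemma cpt_sorted2_eq (tes : List (List (String × Int))) :
    PySem.List.sorted2 tes cptKey1 cptDays = PySem.List.sorted tes cptKey := by
  simp only [PySem.List.sorted2, PySem.List.sorted, if_neg (by decide : ¬ (false = true))]
  congr 1
  funext acc x
  congr 1
  funext a b
  have : (decide (cptKey1 a < cptKey1 b) || !decide (cptKey1 b < cptKey1 a) && decide (cptDays a < cptDays b))
       = decide (cptKey a < cptKey b) := by
    rcases lt_trichotomy (cptKey1 a) (cptKey1 b) with h | h | h
    · simp [cptKey, Prod.Lex.lt_iff, h]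
    · simp [cptKey, Prod.Lex.lt_iff, h]
    · simp [cptKey, Prod.Lex.lt_iff, h]
      omega
  exact this

-- the walk computes the sum over the non-parallel prefix and whether some task is parallel
lemma cptWalk_spec (l : List (List (String × Int))) : ∀ (a : Int),
    cptWalk a l = (a + ((l.takeWhile (fun e => !cptIsPar e)).map cptDays).sum,
                   l.any (fun e => cptIsPar e)) := by
  induction l with
  | nil => intro a; simp [cptWalk]
  | cons e t ih =>
    intro a
    by_cases h : cptIsPar e = true
    · simp [cptWalk, h, List.takeWhile]
    · simp only [Bool.not_eq_true] at h
      simp [cptWalk, h, ih, List.takeWhile]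
      ring

-- consequence of the lexicographic sortedness, elementwise
def cptR (a b : List (String × Int)) : Prop :=
  cptIsPar a = true → (cptIsPar b = true ∧ cptDays a ≤ cptDays b)

lemma cptR_of_key_le {a b : List (String × Int)} (h : cptKey a ≤ cptKey b) : cptR a b := by
  intro hpa
  rw [cptKey, cptKey, Prod.Lex.le_iff] at h
  simp [cptKey1, hpa] at h
  by_cases hpb : cptIsPar b = true
  · simp [hpb] at h; exact ⟨hpb, by omega⟩
  · simp [hpb] at h

-- on a cptR-pairwise list, the non-parallel tasks form a prefix
lemma cpt_split (s : List (List (String × Int))) (h : s.Pairwise cptR) :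
    s.takeWhile (fun e => !cptIsPar e) = s.filter (fun e => !cptIsPar e) ∧
    s.dropWhile (fun e => !cptIsPar e) = s.filter (fun e => cptIsPar e) := by
  induction s with
  | nil => simp
  | cons e t ih =>
    rcases List.pairwise_cons.mp h with ⟨he, ht⟩
    by_cases hp : cptIsPar e = true
    · have hall : ∀ x ∈ t, cptIsPar x = true := fun x hx => ((he x hx) hp).1
      have hnil : t.filter (fun e => !cptIsPar e) = [] :=
        List.filter_eq_nil_iff.mpr (by intro x hx; simp [hall x hx])
      have hself : t.filter (fun e => cptIsPar e) = t :=
        List.filter_eq_self.mpr (by intro x hx; simp [hall x hx])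
      constructor
      · simp [List.takeWhile, hp, hnil]
      · simp [List.dropWhile, hp, hself]
    · simp only [Bool.not_eq_true] at hp
      rcases ih ht with ⟨h1, h2⟩
      constructor
      · simp [List.takeWhile, hp, h1]
      · simp [List.dropWhile, hp, h2]

lemma cpt_last_max {f : List (String × Int) → Int} (l : List (List (String × Int)))
    (h : l.Pairwise (fun a b => f a ≤ f b)) {g : List (String × Int)} (hg : l.getLast? = some g) :
    ∀ x ∈ l, f x ≤ f g := by
  induction l with
  | nil => simp at hg
  | cons e t ih =>
    rcases List.pairwise_cons.mp h with ⟨he, ht⟩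
    rcases t with _ | ⟨e', t'⟩
    · simp at hg; subst hg; simp
    · have hg' : (e' :: t').getLast? = some g := by
        rw [List.getLast?_cons_cons] at hg; exact hg
      intro x hx
      rcases List.mem_cons.mp hx with rfl | hx'
      · exact le_trans (he _ (List.mem_of_getLast? hg')) (le_refl _)
      · exact ih ht hg' x hx'

-- ===== VERDICT (by name: the statement is the Claim_ definition above) =====
theorem calculate_parallel_timeline_spec : Claim_equal_calculate_parallel_timeline := by
  intro tes _ _
  unfold Spec_calculate_parallel_timeline calculate_parallel_timeline calculate_parallel_timeline_alt
  by_cases h : tes = []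
  · simp [h]
  · simp only [h, if_false]
    rw [cpt_sorted2_eq]
    set s := PySem.List.sorted tes cptKey with hs
    have hperm : s.Perm tes := PySem.List.sorted_perm tes cptKey false
    have hpw : s.Pairwise (fun a b => cptKey a ≤ cptKey b) := PySem.List.sorted_pairwise tes cptKey
    have hR : s.Pairwise cptR := hpw.imp cptR_of_key_le
    obtain ⟨htw, hdw⟩ := cpt_split s hR
    have hwalk := cptWalk_spec s 0
    rw [htw] at hwalk
    have hseq : ((tes.filter (fun est => !cptIsPar est)).map (fun t => cptDays t)).sum
              = ((s.filter (fun e => !cptIsPar e)).map cptDays).sum :=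
      ((hperm.filter _).map _).sum_eq.symm
    by_cases hq : s.any (fun e => cptIsPar e) = true
    · -- some task is parallelizable
      have hrne : s.filter (fun e => cptIsPar e) ≠ [] := by
        rcases List.any_eq_true.mp hq with ⟨x, hx, hpx⟩
        intro h0
        exact (List.mem_nil_iff x).mp (h0 ▸ List.mem_filter.mpr ⟨hx, hpx⟩)
      have hsne : s ≠ [] := by
        intro h0; rw [h0] at hrne; simp at hrne
      obtain ⟨g, hg⟩ : ∃ g, s.getLast? = some g := by
        rcases ho : s.getLast? with _ | g
        · exact absurd (List.getLast?_eq_none_iff.mp ho) hsne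
        · exact ⟨g, rfl⟩
      -- the last element of s is the last element of the parallel suffix
      have hsplit : s.takeWhile (fun e => !cptIsPar e) ++ s.filter (fun e => cptIsPar e) = s := by
        rw [← hdw]; exact List.takeWhile_append_dropWhile
      have hgr : (s.filter (fun e => cptIsPar e)).getLast? = some g := by
        rw [← hg]
        conv_rhs => rw [← hsplit]
        exact (List.getLast?_append_of_ne_nil _ hrne).symm
      have hparR : (s.filter (fun e => cptIsPar e)).Pairwise cptR :=
        hR.sublist (List.filter_sublist)
      have hpar : ∀ x ∈ s.filter (fun e => cptIsPar e), cptIsPar x = true := by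
        intro x hx; exact (List.mem_filter.mp hx).2
      have hdpw : (s.filter (fun e => cptIsPar e)).Pairwise (fun a b => cptDays a ≤ cptDays b) := by
        refine List.Pairwise.imp_of_mem ?_ hparR
        intro a b ha hb hab
        exact (hab (hpar a ha)).2
      have hlast : ∀ x ∈ s.filter (fun e => cptIsPar e), cptDays x ≤ cptDays g :=
        cpt_last_max _ hdpw hgr
      have hfne : tes.filter (fun est => cptIsPar est) ≠ [] := by
        rcases List.any_eq_true.mp hq with ⟨x, hx, hpx⟩
        intro h0
        exact (List.mem_nil_iff x).mp
          (h0 ▸ List.mem_filter.mpr ⟨hperm.mem_iff.mp hx, hpx⟩)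
      have hmapperm : ((tes.filter (fun est => cptIsPar est)).map (fun t => cptDays t)).Perm
          ((s.filter (fun e => cptIsPar e)).map cptDays) :=
        ((hperm.filter _).map _).symm
      obtain ⟨m, hm⟩ : ∃ m, PySem.List.max? ((tes.filter (fun est => cptIsPar est)).map (fun t => cptDays t)) (fun x => x) = some m := by
        rcases ho : PySem.List.max? ((tes.filter (fun est => cptIsPar est)).map (fun t => cptDays t)) (fun x => x) with _ | m
        · exact absurd (List.map_eq_nil_iff.mp ((PySem.List.max?_eq_none_iff _ _).mp ho)) hfne
        · exact ⟨m, rfl⟩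
      have hm_eq : m = cptDays g := by
        have hmem := PySem.List.max?_mem hm
        have hmax := PySem.List.max?_isMax hm
        have h1 : m ≤ cptDays g := by
          rcases List.mem_map.mp (hmapperm.mem_iff.mp hmem) with ⟨x, hx, rfl⟩
          exact hlast x hx
        have h2 : cptDays g ≤ m := by
          refine hmax _ (hmapperm.mem_iff.mpr ?_)
          exact List.mem_map.mpr ⟨g, List.mem_of_getLast? hgr, rfl⟩
        omega
      simp only [hwalk, hq, hg, if_pos hfne, hm, hseq]
      simp [hm_eq]
      ring
    · -- no parallelizable task
      simp only [Bool.not_eq_true] at hq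
      have hfe : tes.filter (fun est => cptIsPar est) = [] := by
        refine List.filter_eq_nil_iff.mpr ?_
        intro x hx
        have := List.any_eq_false.mp hq x (hperm.mem_iff.mpr hx)
        simpa using this
      simp only [hwalk, hq, hfe, hseq]
      have hfs : s.filter (fun e => !cptIsPar e) = s := by
        refine List.filter_eq_self.mpr ?_
        intro x hx
        simpa using List.any_eq_false.mp hq x hx
      simp [hfs]
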